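-- pv_equiv track=rewrite | github.com/microsoft/mssql-python | mssql_python/helpers.py | add_driver_to_connection_str
-- ===== SOURCE A (Python) =====
-- def add_driver_to_connection_str(connection_str):
--     """
--     Add the DDBC driver to the connection string if not present.
--
--     Args:
--         connection_str (str): The original connection string.
--
--     Returns:
--         str: The connection string with the DDBC driver added.
--
--     Raises:
--         Exception: If the connection string is invalid.
--     """
--     driver_name = "Driver={ODBC Driver 18 for SQL Server}"
--     try:
--         # Strip any leading or trailing whitespace from the connection string
--         connection_str = connection_str.strip()
--         connection_str = add_driver_name_to_app_parameter(connection_str)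
--
--         # Split the connection string into individual attributes
--         connection_attributes = connection_str.split(";")
--         final_connection_attributes = []
--
--         # Iterate through the attributes and exclude any existing driver attribute
--         for attribute in connection_attributes:
--             if attribute.lower().split("=")[0] == "driver":
--                 continue
--             final_connection_attributes.append(attribute)
--
--         # Join the remaining attributes back into a connection string
--         connection_str = ";".join(final_connection_attributes)
--
--         # Insert the driver attribute at the beginning of the connection string
--         final_connection_attributes.insert(0, driver_name)
--         connection_str = ";".join(final_connection_attributes)
--
--     except Exception as e:
--         raise Exception(
--             "Invalid connection string, Please follow the format: "
--             "Server=server_name;Database=database_name;UID=user_name;PWD=password"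
--         ) from e
--
--     return connection_str
--
-- def add_driver_name_to_app_parameter(connection_string):
--     """
--     Modifies the input connection string by appending the APP name.
--
--     Args:
--         connection_string (str): The input connection string.
--
--     Returns:
--         str: The modified connection string.
--     """
--     # Split the input string into key-value pairs
--     parameters = connection_string.split(";")
--
--     # Initialize variables
--     app_found = False
--     modified_parameters = []
--
--     # Iterate through the key-value pairs
--     for param in parameters:
--         if param.lower().startswith("app="):
--             # Overwrite the value with 'MSSQL-Python'
--             app_found = True
--             key, _ = param.split("=", 1)
--             modified_parameters.append(f"{key}=MSSQL-Python")
--         else: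
--             # Keep other parameters as is
--             modified_parameters.append(param)
--
--     # If APP key is not found, append it
--     if not app_found:
--         modified_parameters.append("APP=MSSQL-Python")
--
--     # Join the parameters back into a connection string
--     return ";".join(modified_parameters) + ";"
-- ===== SOURCE B (Python) =====
-- def add_driver_to_connection_str(connection_str):
--     """Single-pass rewrite: strip, split once on ';', and in one loop overwrite the
--     APP parameter / drop driver attributes, then prepend the driver and re-join."""
--     driver = "Driver={ODBC Driver 18 for SQL Server}"
--     try:
--         out = []
--         app_found = False
--         for p in connection_str.strip().split(";"):
--             head, sep, _ = p.partition("=")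
--             key = head.lower()
--             if key == "app" and sep:
--                 out.append(head + "=MSSQL-Python")
--                 app_found = True
--             elif key == "driver":
--                 continue
--             else:
--                 out.append(p)
--         if not app_found:
--             out.append("APP=MSSQL-Python")
--         out.append("")
--         return ";".join([driver] + out)
--     except Exception as e:
--         raise Exception(
--             "Invalid connection string, Please follow the format: "
--             "Server=server_name;Database=database_name;UID=user_name;PWD=password"
--         ) from e
-- ===== Notes on version B (the rewrite author's own statement) =====
-- stated objective: simpler
-- what changed: A rewrites the APP parameter in one pass, joins and re-splits the string, then filters driver attributes in a second pass; B splits the stripped string once and in a single loop overwrites the APP value, drops driver attributes and sets the found flag, then appends APP/the trailing empty piece and joins once with the driver prepended.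
import Mathlib
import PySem

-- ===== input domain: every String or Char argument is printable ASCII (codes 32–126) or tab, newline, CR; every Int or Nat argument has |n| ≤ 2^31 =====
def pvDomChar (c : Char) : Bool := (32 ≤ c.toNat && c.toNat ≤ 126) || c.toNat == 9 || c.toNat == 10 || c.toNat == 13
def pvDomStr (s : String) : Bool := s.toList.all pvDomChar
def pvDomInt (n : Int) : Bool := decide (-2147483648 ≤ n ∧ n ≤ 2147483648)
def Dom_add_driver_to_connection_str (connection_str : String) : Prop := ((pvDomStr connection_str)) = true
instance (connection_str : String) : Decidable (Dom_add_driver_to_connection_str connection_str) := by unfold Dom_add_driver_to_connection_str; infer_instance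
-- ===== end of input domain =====

-- B replaces A's two passes (APP-rewrite pass producing a string that is split again and
-- filtered for driver attrs) by ONE loop over a single split; same return value.

-- ===== PORT A =====
-- transliteration of helper add_driver_name_to_app_parameter (on char lists)
def pvAddAppParam (connection_string : List Char) : List Char :=
  let parameters := PySem.Chars.splitOn connection_string [';']
  let st := parameters.foldl
    (fun (st : Bool × List (List Char)) param =>
      if PySem.Chars.startswith (PySem.Chars.lower param) "app=".toList then
        -- key, _ = param.split("=", 1)
        let key := (PySem.Chars.splitOnMax param ['='] 1).headD []
        (true, st.2 ++ [key ++ "=MSSQL-Python".toList])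
      else
        (st.1, st.2 ++ [param])) (false, [])
  let modified_parameters := if st.1 then st.2 else st.2 ++ ["APP=MSSQL-Python".toList]
  PySem.Chars.join [';'] modified_parameters ++ [';']

-- A never raises on any str input (the try/except body is total), so the except branch is dead code.
def add_driver_to_connection_str (connection_str : String) : String :=
  let driver_name := "Driver={ODBC Driver 18 for SQL Server}".toList
  let cs := PySem.Chars.strip connection_str.toList
  let cs := pvAddAppParam cs
  let connection_attrs := PySem.Chars.splitOn cs [';']
  let final_connection_attrs := connection_attrs.foldl
    (fun acc attr =>
      if (PySem.Chars.splitOn (PySem.Chars.lower attr) ['=']).headD [] = "driver".toList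
      then acc
      else acc ++ [attr]) []
  -- first ';'.join is overwritten below; then insert(0, driver_name) and the final join
  String.ofList (PySem.Chars.join [';'] (PySem.List.insert final_connection_attrs 0 driver_name))

-- ===== PORT B =====
def add_driver_to_connection_str_alt (connection_str : String) : String :=
  let driver := "Driver={ODBC Driver 18 for SQL Server}".toList
  let parts := PySem.Chars.splitOn (PySem.Chars.strip connection_str.toList) [';']
  let st := parts.foldl
    (fun (st : Bool × List (List Char)) p =>
      -- head, sep, _ = p.partition("="): exact for the single-char separator '='
      let head := p.takeWhile (· != '=')
      let sep := p.any (· == '=')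
      let key := PySem.Chars.lower head
      if key = "app".toList ∧ sep = true then
        (true, st.2 ++ [head ++ "=MSSQL-Python".toList])
      else if key = "driver".toList then st
      else (st.1, st.2 ++ [p])) (false, [])
  let out := if st.1 then st.2 else st.2 ++ ["APP=MSSQL-Python".toList]
  String.ofList (PySem.Chars.join [';'] (driver :: (out ++ [[]])))

-- ===== PRECONDITION & SPEC =====
def Spec_add_driver_to_connection_str (connection_str : String) (out : String) : Prop := out = add_driver_to_connection_str_alt connection_str
instance (connection_str : String) (out : String) : Decidable (Spec_add_driver_to_connection_str connection_str out) := by unfold Spec_add_driver_to_connection_str; infer_instance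

-- ===== CLAIM (what is proved, stated in full; the proofs are below) =====
def Claim_equal_add_driver_to_connection_str : Prop := ∀ (connection_str : String), Dom_add_driver_to_connection_str connection_str → Spec_add_driver_to_connection_str connection_str (add_driver_to_connection_str connection_str)

-- ===== LEMMAS AND PROOFS =====

def pvSplit (c : Char) : List Char → List (List Char)
  | [] => [[]]
  | a :: r => if a = c then [] :: pvSplit c r else (pvSplit c r).modifyHead (a :: ·)

theorem pvSplit_ne_nil (c : Char) (s : List Char) : pvSplit c s ≠ [] := by
  induction s with
  | nil => simp [pvSplit]
  | cons a r ih =>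
    simp only [pvSplit]
    split
    · simp
    · cases h : pvSplit c r with
      | nil => exact absurd h ih
      | cons x t => simp [List.modifyHead]

theorem pvSplitOn_go_eq (c : Char) : ∀ (fuel : Nat) (l cur : List Char) (acc : List (List Char)),
    l.length ≤ fuel →
    PySem.Chars.splitOn.go [c] fuel l cur acc
      = acc.reverse ++ (pvSplit c l).modifyHead (cur.reverse ++ ·) := by
  intro fuel
  induction fuel with
  | zero =>
    intro l cur acc h
    have : l = [] := List.eq_nil_of_length_eq_zero (Nat.le_zero.mp h)
    subst this
    rw [PySem.Chars.splitOn.go.eq_def]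
    simp [pvSplit, List.modifyHead]
  | succ n ih =>
    intro l cur acc h
    cases l with
    | nil =>
      rw [PySem.Chars.splitOn.go.eq_def]
      simp [pvSplit, List.modifyHead]
    | cons a rest =>
      rw [PySem.Chars.splitOn.go.eq_def]
      simp only [List.isPrefixOf, List.isPrefixOf_nil_left, Bool.and_true]
      by_cases hac : a = c
      · subst hac
        simp only [beq_self_eq_true, if_pos, List.length_cons, List.length_nil,
          List.length_singleton, List.drop_succ_cons, List.drop_zero]
        rw [ih rest [] (cur.reverse :: acc) (by simpa using Nat.lt_succ_iff.mp (by simpa using h))]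
        simp only [pvSplit, if_pos rfl, List.modifyHead, List.reverse_cons, List.reverse_nil,
          List.nil_append, List.append_assoc, List.singleton_append]
        cases pvSplit a rest <;> simp
      · have : (c == a) = false := by simp [Ne.symm hac]
        simp only [this, Bool.false_eq_true, if_neg, ite_false]
        rw [ih rest (a :: cur) acc (by simpa using Nat.lt_succ_iff.mp (by simpa using h))]
        simp only [pvSplit, if_neg hac]
        cases hps : pvSplit c rest with
        | nil => exact absurd hps (pvSplit_ne_nil c rest)
        | cons x t => simp [List.modifyHead]

theorem pvSplitOn_eq (c : Char) (s : List Char) : PySem.Chars.splitOn s [c] = pvSplit c s := by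
  unfold PySem.Chars.splitOn
  rw [pvSplitOn_go_eq c (s.length + 1) s [] [] (by omega)]
  cases h : pvSplit c s with
  | nil => exact absurd h (pvSplit_ne_nil c s)
  | cons x t => simp [List.modifyHead]

theorem pvSplit_headD (c : Char) (s : List Char) :
    (pvSplit c s).headD [] = s.takeWhile (· != c) := by
  induction s with
  | nil => simp [pvSplit]
  | cons a r ih =>
    simp only [pvSplit]
    by_cases h : a = c
    · simp [h]
    · simp only [if_neg h, List.takeWhile_cons, bne_iff_ne, ne_eq, h, not_false_eq_true, if_pos]
      cases hps : pvSplit c r with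
      | nil => exact absurd hps (pvSplit_ne_nil c r)
      | cons x t =>
        simp only [List.modifyHead, List.headD_cons]
        rw [hps] at ih
        simp only [List.headD_cons] at ih
        simp [ih, h]

theorem pvSplit_sep_free (c : Char) (s : List Char) : ∀ x ∈ pvSplit c s, c ∉ x := by
  induction s with
  | nil => simp [pvSplit]
  | cons a r ih =>
    simp only [pvSplit]
    by_cases h : a = c
    · simp only [if_pos h, List.mem_cons]
      rintro x (rfl | hx)
      · simp
      · exact ih x hx
    · simp only [if_neg h]
      cases hps : pvSplit c r with
      | nil => exact absurd hps (pvSplit_ne_nil c r)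
      | cons y t =>
        simp only [List.modifyHead, List.mem_cons]
        rintro x (rfl | hx)
        · intro hc
          rcases List.mem_cons.mp hc with rfl | hc
          · exact h rfl
          · exact ih y (hps ▸ List.mem_cons_self ..) hc
        · exact ih x (hps ▸ List.mem_cons_of_mem _ hx)

theorem pvSplit_append_free (c : Char) (p t : List Char) (h : c ∉ p) :
    pvSplit c (p ++ t) = (pvSplit c t).modifyHead (p ++ ·) := by
  induction p with
  | nil =>
    simp only [List.nil_append]
    cases hps : pvSplit c t with
    | nil => exact absurd hps (pvSplit_ne_nil c t)
    | cons x l => simp [List.modifyHead]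
  | cons a p' ih =>
    have ha : a ≠ c := fun hh => h (hh ▸ List.mem_cons_self ..)
    simp only [List.cons_append, pvSplit, if_neg ha]
    rw [ih (fun hm => h (List.mem_cons_of_mem _ hm))]
    cases hps : pvSplit c t with
    | nil => exact absurd hps (pvSplit_ne_nil c t)
    | cons x l => simp [List.modifyHead]

theorem pvSplit_join (c : Char) : ∀ (parts : List (List Char)), parts ≠ [] →
    (∀ x ∈ parts, c ∉ x) → pvSplit c (PySem.Chars.join [c] parts) = parts := by
  intro parts
  induction parts with
  | nil => intro h; exact absurd rfl h
  | cons q rest ih =>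
    intro _ hfree
    cases rest with
    | nil =>
      rw [PySem.Chars.join_singleton]
      have := pvSplit_append_free c q [] (hfree q (List.mem_cons_self ..))
      simpa [pvSplit, List.modifyHead] using this
    | cons r rest' =>
      rw [PySem.Chars.join_cons_cons]
      have hq : c ∉ q := hfree q (List.mem_cons_self ..)
      rw [List.append_assoc, pvSplit_append_free c q _ hq]
      have : pvSplit c ([c] ++ PySem.Chars.join [c] (r :: rest')) =
          [] :: pvSplit c (PySem.Chars.join [c] (r :: rest')) := by
        simp [pvSplit]
      rw [this, ih (by simp) (fun x hx => hfree x (List.mem_cons_of_mem _ hx))]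
      simp [List.modifyHead]

theorem pvJoin_snoc_nil (c : Char) : ∀ (parts : List (List Char)), parts ≠ [] →
    PySem.Chars.join [c] (parts ++ [[]]) = PySem.Chars.join [c] parts ++ [c] := by
  intro parts
  induction parts with
  | nil => intro h; exact absurd rfl h
  | cons q rest ih =>
    intro _
    cases rest with
    | nil => simp [PySem.Chars.join_singleton, PySem.Chars.join_cons_cons, PySem.Chars.join_nil]
    | cons r rest' =>
      simp only [List.cons_append, PySem.Chars.join_cons_cons]
      rw [show r :: (rest' ++ [[]]) = (r :: rest') ++ [[]] from rfl, ih (by simp)]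
      simp

theorem pvGoMax0_headD (c : Char) (fuel : Nat) (l cur : List Char) (x : List Char) :
    (PySem.Chars.splitOnMax.go [c] fuel 0 l cur [x]).headD [] = x := by
  cases fuel with
  | zero => rw [PySem.Chars.splitOnMax.go.eq_def]; simp
  | succ n =>
    cases l with
    | nil => rw [PySem.Chars.splitOnMax.go.eq_def]; simp
    | cons a rest => rw [PySem.Chars.splitOnMax.go.eq_def]; simp

theorem pvGoMax1_headD (c : Char) : ∀ (fuel : Nat) (l cur : List Char), l.length ≤ fuel →
    (PySem.Chars.splitOnMax.go [c] fuel 1 l cur []).headD []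
      = cur.reverse ++ l.takeWhile (· != c) := by
  intro fuel
  induction fuel with
  | zero =>
    intro l cur h
    have : l = [] := List.eq_nil_of_length_eq_zero (Nat.le_zero.mp h)
    subst this
    rw [PySem.Chars.splitOnMax.go.eq_def]; simp
  | succ n ih =>
    intro l cur h
    cases l with
    | nil => rw [PySem.Chars.splitOnMax.go.eq_def]; simp
    | cons a rest =>
      rw [PySem.Chars.splitOnMax.go.eq_def]
      simp only [List.isPrefixOf, Bool.and_true, List.isPrefixOf_nil_left]
      by_cases hac : a = c
      · subst hac
        simp only [beq_self_eq_true, if_pos, Nat.succ_ne_zero, ite_false, if_neg,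
          List.length_cons, List.length_nil, List.drop_succ_cons, List.drop_zero,
          Nat.zero_lt_one, OfNat.ofNat_ne_zero]
        rw [pvGoMax0_headD]
        simp [List.takeWhile_cons]
      · have hca : (c == a) = false := by simp [Ne.symm hac]
        simp only [hca, Bool.false_eq_true, ite_false, OfNat.ofNat_ne_zero, if_neg]
        rw [if_neg (by norm_num)]
        rw [ih rest (a :: cur) (by simpa using Nat.lt_succ_iff.mp (by simpa using h))]
        simp [List.takeWhile_cons, hac]

theorem pvKeyA_eq (p : List Char) :
    (PySem.Chars.splitOnMax p ['='] 1).headD [] = p.takeWhile (· != '=') := by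
  unfold PySem.Chars.splitOnMax
  rw [if_neg (by norm_num)]
  rw [show (1:Int).toNat = 1 from rfl]
  rw [pvGoMax1_headD '=' (p.length + 1) p [] (by omega)]
  simp

theorem pvLowerChar_eq_iff (a : Char) : PySem.Chars.lowerChar a = '=' ↔ a = '=' := by
  have h61 : ('=' : Char).toNat = 61 := rfl
  unfold PySem.Chars.lowerChar PySem.Chars.isupper
  by_cases h : 'A' ≤ a ∧ a ≤ 'Z'
  · have h1 : 65 ≤ a.toNat := h.1
    have h2 : a.toNat ≤ 90 := h.2
    rw [if_pos (by simp [h.1, h.2])]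
    constructor
    · intro hEq
      have hv : (a.toNat + 32).isValidChar := Or.inl (by omega)
      have hthis := congrArg Char.toNat hEq
      rw [Char.toNat_ofNat, if_pos hv, h61] at hthis
      omega
    · intro hEq
      subst hEq
      rw [h61] at h1
      exact absurd h1 (by omega)
  · rw [if_neg (by
      simp only [Bool.and_eq_true, decide_eq_true_eq]
      exact fun hh => h hh)]

theorem pvLowerChar_bne (x : Char) :
    (PySem.Chars.lowerChar x != '=') = (x != '=') := by
  by_cases hx : x = '='
  · subst hx; decide
  · have hne : PySem.Chars.lowerChar x ≠ '=' := fun hh => hx ((pvLowerChar_eq_iff x).mp hh)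
    have h1 : (PySem.Chars.lowerChar x != '=') = true := by simp [hne]
    have h2 : (x != '=') = true := by simp [hx]
    rw [h1, h2]

theorem pvLowerChar_beq (x : Char) :
    (PySem.Chars.lowerChar x == '=') = (x == '=') := by
  by_cases hx : x = '='
  · subst hx; decide
  · have hne : PySem.Chars.lowerChar x ≠ '=' := fun hh => hx ((pvLowerChar_eq_iff x).mp hh)
    have h1 : (PySem.Chars.lowerChar x == '=') = false := by simp [hne]
    have h2 : (x == '=') = false := by simp [hx]
    rw [h1, h2]

theorem pvTakeWhile_lower (p : List Char) :
    (PySem.Chars.lower p).takeWhile (· != '=') = PySem.Chars.lower (p.takeWhile (· != '=')) := by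
  unfold PySem.Chars.lower
  rw [List.takeWhile_map]
  have hpred : ((fun x : Char => x != '=') ∘ PySem.Chars.lowerChar) = fun x : Char => x != '=' := by
    funext x
    exact pvLowerChar_bne x
  rw [hpred]

theorem pvAny_lower (p : List Char) :
    (PySem.Chars.lower p).any (· == '=') = p.any (· == '=') := by
  unfold PySem.Chars.lower
  rw [List.any_map]
  have hpred : ((fun x : Char => x == '=') ∘ PySem.Chars.lowerChar) = fun x : Char => x == '=' := by
    funext x
    exact pvLowerChar_beq x
  rw [hpred]

theorem pvPrefix_iff (e : Char) (k : List Char) (he : e ∉ k) : ∀ (q : List Char),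
    ((k ++ [e]).isPrefixOf q = true ↔ (q.takeWhile (· != e) = k ∧ q.any (· == e) = true)) := by
  induction k with
  | nil =>
    intro q
    cases q with
    | nil => simp [List.isPrefixOf]
    | cons a r =>
      by_cases h : a = e
      · subst h
        simp [List.isPrefixOf, List.takeWhile_cons]
      · simp [List.isPrefixOf, List.takeWhile_cons, h, Ne.symm h]
  | cons x k' ih =>
    have hxe : x ≠ e := fun hh => he (hh ▸ List.mem_cons_self ..)
    have he' : e ∉ k' := fun hm => he (List.mem_cons_of_mem _ hm)
    intro q
    cases q with
    | nil => simp [List.isPrefixOf]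
    | cons a r =>
      simp only [List.cons_append, List.isPrefixOf, List.takeWhile_cons, List.any_cons]
      by_cases h : a = e
      · subst h
        simp [show (x == a) = false by simp [hxe]]
      · by_cases hax : a = x
        · subst hax
          rw [if_pos (by simp [h])]
          simp only [beq_self_eq_true, Bool.true_and, show (a == e) = false by simp [h],
            Bool.false_or, List.cons.injEq, true_and]
          exact ih he' r
        · rw [if_pos (by simp [h])]
          simp [show (x == a) = false by simp [Ne.symm hax], hax,
            show (a == e) = false by simp [h]]

theorem pvAppCond_iff (p : List Char) :
    (PySem.Chars.startswith (PySem.Chars.lower p) "app=".toList = true)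
      ↔ (PySem.Chars.lower (p.takeWhile (· != '=')) = "app".toList ∧ p.any (· == '=') = true) := by
  unfold PySem.Chars.startswith
  have h : ("app=".toList : List Char) = "app".toList ++ ['='] := by decide
  rw [h, pvPrefix_iff '=' "app".toList (by decide) (PySem.Chars.lower p),
    pvTakeWhile_lower, pvAny_lower]

theorem pvDrvCond_iff (m : List Char) :
    ((PySem.Chars.splitOn (PySem.Chars.lower m) ['=']).headD [] = "driver".toList)
      ↔ PySem.Chars.lower (m.takeWhile (· != '=')) = "driver".toList := by
  rw [pvSplitOn_eq, pvSplit_headD, pvTakeWhile_lower]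

def pvF (p : List Char) : List Char :=
  if PySem.Chars.startswith (PySem.Chars.lower p) "app=".toList
  then (PySem.Chars.splitOnMax p ['='] 1).headD [] ++ "=MSSQL-Python".toList
  else p

def pvDrv (m : List Char) : Bool :=
  decide ((PySem.Chars.splitOn (PySem.Chars.lower m) ['=']).headD [] = "driver".toList)

def pvGB (p : List Char) : List (List Char) :=
  if PySem.Chars.lower (p.takeWhile (· != '=')) = "app".toList ∧ p.any (· == '=') = true
  then [p.takeWhile (· != '=') ++ "=MSSQL-Python".toList]
  else if PySem.Chars.lower (p.takeWhile (· != '=')) = "driver".toList then []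
  else [p]

theorem pvFoldApp (ps : List (List Char)) : ∀ (b : Bool) (l : List (List Char)),
    ps.foldl
      (fun (st : Bool × List (List Char)) param =>
        if PySem.Chars.startswith (PySem.Chars.lower param) "app=".toList then
          let key := (PySem.Chars.splitOnMax param ['='] 1).headD []
          (true, st.2 ++ [key ++ "=MSSQL-Python".toList])
        else
          (st.1, st.2 ++ [param])) (b, l)
    = (b || ps.any (fun p => PySem.Chars.startswith (PySem.Chars.lower p) "app=".toList),
       l ++ ps.map pvF) := by
  induction ps with
  | nil => intro b l; simp
  | cons p ps ih =>
    intro b l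
    simp only [List.foldl_cons, List.any_cons, List.map_cons]
    by_cases h : PySem.Chars.startswith (PySem.Chars.lower p) "app=".toList = true
    · rw [if_pos h, ih]
      simp only [pvF]
      rw [if_pos h, h]
      simp [List.append_assoc]
    · simp only [Bool.not_eq_true] at h
      rw [if_neg (by simp only [h, Bool.false_eq_true, not_false_eq_true]), ih]
      simp only [pvF]
      rw [if_neg (by simp only [h, Bool.false_eq_true, not_false_eq_true]), h]
      simp [List.append_assoc]

theorem pvFoldDrv (ms : List (List Char)) : ∀ (l : List (List Char)),
    ms.foldl
      (fun acc attr =>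
        if (PySem.Chars.splitOn (PySem.Chars.lower attr) ['=']).headD [] = "driver".toList
        then acc
        else acc ++ [attr]) l
    = l ++ ms.flatMap (fun m => if pvDrv m then [] else [m]) := by
  induction ms with
  | nil => intro l; simp
  | cons m ms ih =>
    intro l
    simp only [List.foldl_cons, List.flatMap_cons]
    by_cases h : (PySem.Chars.splitOn (PySem.Chars.lower m) ['=']).headD [] = "driver".toList
    · rw [if_pos h, ih]
      have hd : pvDrv m = true := by rw [pvDrv]; exact decide_eq_true h
      simp [hd]
    · rw [if_neg h, ih]
      have hd : pvDrv m = false := by rw [pvDrv]; exact decide_eq_false h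
      simp [hd, List.append_assoc]

theorem pvFoldB (ps : List (List Char)) : ∀ (b : Bool) (l : List (List Char)),
    ps.foldl
      (fun (st : Bool × List (List Char)) p =>
        let head := p.takeWhile (· != '=')
        let sep := p.any (· == '=')
        let key := PySem.Chars.lower head
        if key = "app".toList ∧ sep = true then
          (true, st.2 ++ [head ++ "=MSSQL-Python".toList])
        else if key = "driver".toList then st
        else (st.1, st.2 ++ [p])) (b, l)
    = (b || ps.any (fun p =>
          decide (PySem.Chars.lower (p.takeWhile (· != '=')) = "app".toList ∧ p.any (· == '=') = true)),
       l ++ ps.flatMap pvGB) := by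
  induction ps with
  | nil => intro b l; simp
  | cons p ps ih =>
    intro b l
    simp only [List.foldl_cons, List.any_cons, List.flatMap_cons]
    by_cases h1 : PySem.Chars.lower (p.takeWhile (· != '=')) = "app".toList ∧ p.any (· == '=') = true
    · rw [if_pos h1, ih]
      simp only [pvGB]
      rw [if_pos h1, decide_eq_true h1]
      simp [List.append_assoc]
    · rw [if_neg h1]
      by_cases h2 : PySem.Chars.lower (p.takeWhile (· != '=')) = "driver".toList
      · rw [if_pos h2, ih]
        simp only [pvGB]
        rw [if_neg h1, if_pos h2, decide_eq_false h1]
        simp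
      · rw [if_neg h2, ih]
        simp only [pvGB]
        rw [if_neg h1, if_neg h2, decide_eq_false h1]
        simp [List.append_assoc]

theorem pvTakeWhile_append (c : Char) (u v : List Char) (h : ∀ a ∈ u, a ≠ c) :
    (u ++ c :: v).takeWhile (· != c) = u := by
  induction u with
  | nil => simp [List.takeWhile_cons]
  | cons a u' ih =>
    have ha : a ≠ c := h a (List.mem_cons_self ..)
    simp only [List.cons_append, List.takeWhile_cons, bne_iff_ne, ne_eq, ha, not_false_eq_true,
      if_pos, List.cons.injEq, true_and]
    exact ih (fun a ham => h a (List.mem_cons_of_mem _ ham))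

theorem pvPoint (p : List Char) :
    (if pvDrv (pvF p) then ([] : List (List Char)) else [pvF p]) = pvGB p := by
  have heq : ("=MSSQL-Python".toList : List Char) = '=' :: "MSSQL-Python".toList := rfl
  have htw : ∀ a ∈ p.takeWhile (· != '='), a ≠ '=' := by
    intro a ha
    have := List.mem_takeWhile_imp ha
    simpa using this
  by_cases hA : PySem.Chars.startswith (PySem.Chars.lower p) "app=".toList = true
  · obtain ⟨hk, hany⟩ := (pvAppCond_iff p).mp hA
    have hF : pvF p = p.takeWhile (· != '=') ++ "=MSSQL-Python".toList := by
      rw [pvF, if_pos hA, pvKeyA_eq]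
    have hdrv : pvDrv (pvF p) = false := by
      rw [pvDrv]
      apply decide_eq_false
      intro hcontr
      rw [pvDrvCond_iff, hF, heq, pvTakeWhile_append '=' _ _ htw, hk] at hcontr
      exact absurd hcontr (by decide)
    have hcnd : PySem.Chars.lower (p.takeWhile (· != '=')) = "app".toList ∧
        p.any (· == '=') = true := ⟨hk, hany⟩
    rw [pvGB, if_pos hcnd, hdrv]
    simp [hF]
  · have hnB : ¬ (PySem.Chars.lower (p.takeWhile (· != '=')) = "app".toList ∧
        p.any (· == '=') = true) := fun hc => hA ((pvAppCond_iff p).mpr hc)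
    have hF : pvF p = p := by rw [pvF, if_neg hA]
    rw [hF, pvGB, if_neg hnB]
    by_cases hd : PySem.Chars.lower (p.takeWhile (· != '=')) = "driver".toList
    · have : pvDrv p = true := by rw [pvDrv]; exact decide_eq_true ((pvDrvCond_iff p).mpr hd)
      rw [this, if_pos hd]
      simp
    · have : pvDrv p = false := by
        rw [pvDrv]; exact decide_eq_false (fun hc => hd ((pvDrvCond_iff p).mp hc))
      rw [this, if_neg hd]
      simp

theorem pvMapFlat (ps : List (List Char)) :
    (ps.map pvF).flatMap (fun m => if pvDrv m then ([] : List (List Char)) else [m])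
      = ps.flatMap pvGB := by
  induction ps with
  | nil => simp
  | cons p ps ih => simp only [List.map_cons, List.flatMap_cons, ih, pvPoint p]

theorem pvF_free (p : List Char) (h : ';' ∉ p) : ';' ∉ pvF p := by
  rw [pvF]
  split
  · rw [pvKeyA_eq]
    intro hm
    rcases List.mem_append.mp hm with hm | hm
    · exact h (List.takeWhile_subset _ hm)
    · exact absurd hm (by decide)
  · exact h

theorem pvCond_eq (p : List Char) :
    PySem.Chars.startswith (PySem.Chars.lower p) "app=".toList
      = decide (PySem.Chars.lower (p.takeWhile (· != '=')) = "app".toList ∧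
          p.any (· == '=') = true) := by
  by_cases hA : PySem.Chars.startswith (PySem.Chars.lower p) "app=".toList = true
  · rw [hA]
    exact (decide_eq_true ((pvAppCond_iff p).mp hA)).symm
  · have h1 : PySem.Chars.startswith (PySem.Chars.lower p) "app=".toList = false :=
      Bool.not_eq_true _ ▸ hA
    rw [h1]
    exact (decide_eq_false (fun hc => hA ((pvAppCond_iff p).mpr hc))).symm

theorem pvMain (s : String) : add_driver_to_connection_str s = add_driver_to_connection_str_alt s := by
  simp only [add_driver_to_connection_str, add_driver_to_connection_str_alt, pvAddAppParam]
  rw [pvFoldApp, pvFoldB]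
  simp only [Bool.false_or, List.nil_append]
  have hfree : ∀ x ∈ PySem.Chars.splitOn (PySem.Chars.strip s.toList) [';'], ';' ∉ x := by
    rw [pvSplitOn_eq]; exact pvSplit_sep_free ';' _
  have hne : PySem.Chars.splitOn (PySem.Chars.strip s.toList) [';'] ≠ [] := by
    rw [pvSplitOn_eq]; exact pvSplit_ne_nil ';' _
  have hcong : (PySem.Chars.splitOn (PySem.Chars.strip s.toList) [';']).any
        (fun p => PySem.Chars.startswith (PySem.Chars.lower p) "app=".toList)
      = (PySem.Chars.splitOn (PySem.Chars.strip s.toList) [';']).any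
        (fun p => decide (PySem.Chars.lower (p.takeWhile (· != '=')) = "app".toList ∧
          p.any (· == '=') = true)) := by
    congr 1
    funext p
    exact pvCond_eq p
  rw [← hcong]
  set ps := PySem.Chars.splitOn (PySem.Chars.strip s.toList) [';'] with hps
  have happ : ';' ∉ ("APP=MSSQL-Python".toList : List Char) := by decide
  have hMfree : ∀ x ∈ ps.map pvF, ';' ∉ x := by
    intro x hx
    rcases List.mem_map.mp hx with ⟨p, hp, rfl⟩
    exact pvF_free p (hfree p hp)
  have hMne : ps.map pvF ≠ [] := by
    intro hh
    exact hne (List.map_eq_nil_iff.mp hh)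
  have hAheadNil : (fun m => if pvDrv m then ([] : List (List Char)) else [m]) [] = [[]] := by decide
  have hAheadApp : (fun m => if pvDrv m then ([] : List (List Char)) else [m])
      "APP=MSSQL-Python".toList = ["APP=MSSQL-Python".toList] := by decide
  by_cases hf : ps.any (fun p => PySem.Chars.startswith (PySem.Chars.lower p) "app=".toList) = true
  · rw [if_pos hf, if_pos hf]
    rw [pvSplitOn_eq, ← pvJoin_snoc_nil ';' _ hMne, pvSplit_join ';' _ (by simp) (by
      intro x hx
      rcases List.mem_append.mp hx with hx | hx
      · exact hMfree x hx
      · simp at hx; subst hx; simp)]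
    rw [pvFoldDrv]
    simp only [List.nil_append, List.flatMap_append, pvMapFlat]
    simp [hAheadNil, PySem.List.insert_zero]
  · rw [if_neg hf, if_neg hf]
    have hMne' : ps.map pvF ++ ["APP=MSSQL-Python".toList] ≠ [] := by simp
    rw [pvSplitOn_eq, ← pvJoin_snoc_nil ';' _ hMne', pvSplit_join ';' _ (by simp) (by
      intro x hx
      rcases List.mem_append.mp hx with hx | hx
      · rcases List.mem_append.mp hx with hx | hx
        · exact hMfree x hx
        · simp at hx; subst hx; exact happ
      · simp at hx; subst hx; simp)]
    rw [pvFoldDrv]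
    have happD : pvDrv ['A','P','P','=','M','S','S','Q','L','-','P','y','t','h','o','n'] = false := by
      decide
    simp only [List.nil_append, List.flatMap_append, pvMapFlat]
    simp [hAheadNil, happD, PySem.List.insert_zero]

-- ===== VERDICT (by name: the statement is the Claim_ definition above) =====
theorem add_driver_to_connection_str_spec : Claim_equal_add_driver_to_connection_str := by
  intro connection_str _
  show add_driver_to_connection_str connection_str = add_driver_to_connection_str_alt connection_str
  exact pvMain connection_str
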